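-- pv_equiv track=rewrite | github.com/wwwyo/atcoder | contest/典型/3.py | bfs
-- ===== SOURCE A (Python) =====
-- from collections import deque
--
-- def bfs(tree, ini):
--     queue = deque()
--     visited = set()
--
--     # 終端ノード
--     last_node = 0
--     # 距離
--     step = 0
--
--     queue.append(ini)
--     visited.add(ini)
--     while len(queue) > 0:
--         new_queue = deque()
--         for node in queue:
--             for next in tree[node]:
--                 if not next in visited:
--                     visited.add(next)
--                     new_queue.append(next)
--                     last_node = next
--         step +=1
--         queue = new_queue
--
--     return step,node
-- ===== SOURCE B (Python) =====
-- from collections import deque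
--
-- def bfs(tree, ini):
--     # Single-queue BFS carrying (node, depth) pairs instead of level-synchronous rounds.
--     queue = deque([(ini, 0)])
--     visited = {ini}
--     node, depth = ini, 0
--     while queue:
--         node, depth = queue.popleft()
--         for nxt in tree[node]:
--             if nxt not in visited:
--                 visited.add(nxt)
--                 queue.append((nxt, depth + 1))
--     return depth + 1, node
-- ===== Notes on version B (the rewrite author's own statement) =====
-- stated objective: alternative
-- what changed: A runs level-synchronous BFS (a fresh deque per level, a per-level step counter, the answer node read off the loop variable of the last level); B runs a classic single-queue BFS over (node, depth) pairs, popping one node at a time and returning the depth of the last popped node plus one together with that node.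
import Mathlib
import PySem

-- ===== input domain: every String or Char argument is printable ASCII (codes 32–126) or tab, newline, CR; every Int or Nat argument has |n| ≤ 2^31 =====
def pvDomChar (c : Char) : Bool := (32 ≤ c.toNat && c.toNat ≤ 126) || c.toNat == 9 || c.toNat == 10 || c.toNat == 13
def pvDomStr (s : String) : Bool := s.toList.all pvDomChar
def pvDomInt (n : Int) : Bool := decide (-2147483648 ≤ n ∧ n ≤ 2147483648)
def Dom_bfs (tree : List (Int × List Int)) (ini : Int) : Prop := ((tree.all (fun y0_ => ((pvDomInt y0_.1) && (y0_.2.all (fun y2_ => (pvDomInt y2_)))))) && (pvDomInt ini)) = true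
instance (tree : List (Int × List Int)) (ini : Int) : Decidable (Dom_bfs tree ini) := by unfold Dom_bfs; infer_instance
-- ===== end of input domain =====

-- B replaces A's level-synchronous BFS (per-level deque + step counter) by a single-queue BFS
-- over (node, depth) pairs; same return value, alternative decomposition (no speed claim).

-- shared helper: tree[node] (dict lookup; exact where the key is present — Python raises KeyError
-- on a missing key, which Pre_bfs excludes)
def pvAdj (tree : List (Int × List Int)) (n : Int) : List Int :=
  PySem.Dict.getD (PySem.Dict.mk tree) n []

-- termination-measure helpers (cited by the ports' decreasing_by; not part of the algorithm)
def pvUniv (tree : List (Int × List Int)) : List Int :=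
  (tree.map Prod.snd).flatten

def pvCnt (tree : List (Int × List Int)) (v : PySem.Set Int) : Nat :=
  ((pvUniv tree).toFinset.filter (fun x => ¬ x ∈ v)).card

lemma pvAdj_subset (tree : List (Int × List Int)) (n : Int) :
    ∀ x ∈ pvAdj tree n, x ∈ pvUniv tree := by
  induction tree with
  | nil => intro x hx; simp [pvAdj, PySem.Dict.getD, PySem.Dict.get?] at hx
  | cons p rest ih =>
      intro x hx
      simp only [pvAdj, PySem.Dict.getD] at hx ih
      obtain ⟨k, vs⟩ := p
      rw [PySem.Dict.get?_mk_cons] at hx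
      by_cases hk : (k == n) = true
      · rw [if_pos hk] at hx
        simp only [Option.getD_some] at hx
        simp [pvUniv]
        exact Or.inl hx
      · rw [if_neg hk] at hx
        have := ih x hx
        simp [pvUniv] at this ⊢
        exact Or.inr this

lemma pvCnt_add_succ_le (tree : List (Int × List Int)) {v : PySem.Set Int} {x : Int}
    (hx : x ∈ pvUniv tree) (hv : x ∉ v) :
    pvCnt tree (PySem.Set.add v x) + 1 ≤ pvCnt tree v := by
  have hss : ((pvUniv tree).toFinset.filter (fun y => ¬ y ∈ PySem.Set.add v x)) ⊂
      ((pvUniv tree).toFinset.filter (fun y => ¬ y ∈ v)) := by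
    rw [Finset.ssubset_def]
    constructor
    · intro y hy
      simp only [Finset.mem_filter, PySem.Set.mem_add] at hy ⊢
      exact ⟨hy.1, fun h => hy.2 (Or.inl h)⟩
    · intro hsub
      have hxmem : x ∈ ((pvUniv tree).toFinset.filter (fun y => ¬ y ∈ v)) := by
        simp [Finset.mem_filter, List.mem_toFinset, hx, hv]
      have := hsub hxmem
      simp [Finset.mem_filter, PySem.Set.mem_add] at this
  have := Finset.card_lt_card hss
  unfold pvCnt
  omega

-- ===== PORT A =====
-- the inner 'for next in tree[node]' loop; state = (visited, new_queue, last_node)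
def bfsInnerA (ns : List Int) (st : PySem.Set Int × List Int × Int) :
    PySem.Set Int × List Int × Int :=
  ns.foldl
    (fun st next =>
      if !(PySem.Set.contains st.1 next) then
        (PySem.Set.add st.1 next, st.2.1 ++ [next], next)
      else st)
    st

-- the 'for node in queue' loop of one level
def bfsLevel (tree : List (Int × List Int)) (nodes : List Int)
    (st : PySem.Set Int × List Int × Int) : PySem.Set Int × List Int × Int :=
  nodes.foldl (fun st node => bfsInnerA (pvAdj tree node) st) st

lemma bfsInnerA_cnt (tree : List (Int × List Int)) :
    ∀ ns, (∀ x ∈ ns, x ∈ pvUniv tree) → ∀ st : PySem.Set Int × List Int × Int,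
      pvCnt tree (bfsInnerA ns st).1 + (bfsInnerA ns st).2.1.length ≤
        pvCnt tree st.1 + st.2.1.length := by
  intro ns
  induction ns with
  | nil => intro _ st; simp [bfsInnerA]
  | cons n ns ih =>
      intro hsub st
      have hn : n ∈ pvUniv tree := hsub n (by simp)
      have hsub' : ∀ x ∈ ns, x ∈ pvUniv tree := fun x hx => hsub x (by simp [hx])
      simp only [bfsInnerA, List.foldl_cons]
      by_cases hc : n ∈ st.1
      · rw [if_neg (by simp [hc])]
        exact ih hsub' st
      · rw [if_pos (by simp [hc])]
        have h1 := ih hsub' (PySem.Set.add st.1 n, st.2.1 ++ [n], n)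
        have h2 := pvCnt_add_succ_le tree hn hc
        simp only [bfsInnerA] at h1
        simp only [List.length_append, List.length_cons, List.length_nil] at h1
        omega

lemma bfsLevel_cnt (tree : List (Int × List Int)) :
    ∀ nodes (st : PySem.Set Int × List Int × Int),
      pvCnt tree (bfsLevel tree nodes st).1 + (bfsLevel tree nodes st).2.1.length ≤
        pvCnt tree st.1 + st.2.1.length := by
  intro nodes
  induction nodes with
  | nil => intro st; simp [bfsLevel]
  | cons n ns ih =>
      intro st
      simp only [bfsLevel, List.foldl_cons]
      have h1 := ih (bfsInnerA (pvAdj tree n) st)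
      have h2 := bfsInnerA_cnt tree (pvAdj tree n) (pvAdj_subset tree n) st
      simp only [bfsLevel] at h1
      omega

-- the 'while len(queue) > 0' loop; A returns (step, node) where node is the loop variable
-- of the last executed level, i.e. the last element of that level's queue
def bfsLoop (tree : List (Int × List Int)) (queue : List Int) (visited : PySem.Set Int)
    (step node last_node : Int) : Int × Int :=
  if h : queue = [] then (step, node)
  else
    let r := bfsLevel tree queue (visited, ([], last_node))
    bfsLoop tree r.2.1 r.1 (step + 1) (queue.getLast h) r.2.2
termination_by pvCnt tree visited + queue.length
decreasing_by
  have h1 := bfsLevel_cnt tree queue (visited, ([], last_node))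
  have h2 : 0 < queue.length := List.length_pos_iff.mpr h
  simp only [List.length_nil] at h1
  omega

def bfs (tree : List (Int × List Int)) (ini : Int) : Int × Int :=
  bfsLoop tree [ini] (PySem.Set.add PySem.Set.empty ini) 0 0 0

-- ===== PORT B =====
-- the inner 'for nxt in tree[node]' loop; state = (visited, queue); discovered nodes are
-- appended to the single queue with depth d1
def bfsInnerB (ns : List Int) (d1 : Int) (st : PySem.Set Int × List (Int × Int)) :
    PySem.Set Int × List (Int × Int) :=
  ns.foldl
    (fun st nxt =>
      if !(PySem.Set.contains st.1 nxt) then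
        (PySem.Set.add st.1 nxt, st.2 ++ [(nxt, d1)])
      else st)
    st

lemma bfsInnerB_cnt (tree : List (Int × List Int)) :
    ∀ ns, (∀ x ∈ ns, x ∈ pvUniv tree) → ∀ (d1 : Int) (st : PySem.Set Int × List (Int × Int)),
      pvCnt tree (bfsInnerB ns d1 st).1 + (bfsInnerB ns d1 st).2.length ≤
        pvCnt tree st.1 + st.2.length := by
  intro ns
  induction ns with
  | nil => intro _ d1 st; simp [bfsInnerB]
  | cons n ns ih =>
      intro hsub d1 st
      have hn : n ∈ pvUniv tree := hsub n (by simp)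
      have hsub' : ∀ x ∈ ns, x ∈ pvUniv tree := fun x hx => hsub x (by simp [hx])
      simp only [bfsInnerB, List.foldl_cons]
      by_cases hc : n ∈ st.1
      · rw [if_neg (by simp [hc])]
        exact ih hsub' d1 st
      · rw [if_pos (by simp [hc])]
        have h1 := ih hsub' d1 (PySem.Set.add st.1 n, st.2 ++ [(n, d1)])
        have h2 := pvCnt_add_succ_le tree hn hc
        simp only [bfsInnerB] at h1
        simp only [List.length_append, List.length_cons, List.length_nil] at h1
        omega

-- single-queue pop loop; (node, depth) remember the last popped pair
def bfsAltLoop (tree : List (Int × List Int)) (queue : List (Int × Int))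
    (visited : PySem.Set Int) (node depth : Int) : Int × Int :=
  match queue with
  | [] => (depth + 1, node)
  | (n, d) :: rest =>
      let r := bfsInnerB (pvAdj tree n) (d + 1) (visited, rest)
      bfsAltLoop tree r.2 r.1 n d
termination_by pvCnt tree visited + queue.length
decreasing_by
  have h1 := bfsInnerB_cnt tree (pvAdj tree n) (pvAdj_subset tree n) (d + 1) (visited, rest)
  simp only [List.length_cons] at *
  omega

def bfs_alt (tree : List (Int × List Int)) (ini : Int) : Int × Int :=
  bfsAltLoop tree [(ini, 0)] (PySem.Set.add PySem.Set.empty ini) ini 0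

-- ===== PRECONDITION & SPEC =====
-- the nodes reachable from ini along the adjacency lists (one expansion per round;
-- tree.length + 1 rounds reach everything, since a shortest path passes through distinct keys)
def pvReach (tree : List (Int × List Int)) (ini : Int) : List Int :=
  (fun S => (S ++ S.flatMap (fun n => pvAdj tree n)).dedup)^[tree.length + 1] [ini]

-- Pre_ excludes exactly the inputs on which the Python raises KeyError: it holds iff every node
-- reachable from ini is a key of tree (tree[node] is evaluated exactly at the reachable nodes)
def Pre_bfs (tree : List (Int × List Int)) (ini : Int) : Prop :=
  ∀ x ∈ pvReach tree ini, PySem.Dict.contains (PySem.Dict.mk tree) x = true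
instance (tree : List (Int × List Int)) (ini : Int) : Decidable (Pre_bfs tree ini) := by
  unfold Pre_bfs; infer_instance

def pvWitness_bfs : (List (Int × List Int)) × Int := ([(0, [1, 2]), (1, [0]), (2, [])], 0)

def Spec_bfs (tree : List (Int × List Int)) (ini : Int) (out : Int × Int) : Prop := out = bfs_alt tree ini
instance (tree : List (Int × List Int)) (ini : Int) (out : Int × Int) : Decidable (Spec_bfs tree ini out) := by unfold Spec_bfs; infer_instance

-- ===== CLAIM (what is proved, stated in full; the proofs are below) =====
def Claim_equal_bfs : Prop := ∀ (tree : List (Int × List Int)) (ini : Int), Dom_bfs tree ini → Pre_bfs tree ini → Spec_bfs tree ini (bfs tree ini)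

-- ===== LEMMAS AND PROOFS =====

-- B's inner loop on queue 'p ++ (A's pending next level, tagged with depth d1)' is A's inner loop
lemma inner_rel (d1 : Int) :
    ∀ ns (p : List (Int × Int)) (st : PySem.Set Int × List Int × Int),
      bfsInnerB ns d1 (st.1, p ++ st.2.1.map (fun x => (x, d1))) =
        ((bfsInnerA ns st).1, p ++ ((bfsInnerA ns st).2.1).map (fun x => (x, d1))) := by
  intro ns
  induction ns with
  | nil => intro p st; simp [bfsInnerA, bfsInnerB]
  | cons n ns ih =>
      intro p st
      simp only [bfsInnerA, bfsInnerB, List.foldl_cons]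
      by_cases hc : n ∈ st.1
      · rw [if_neg (by simp [hc]), if_neg (by simp [hc])]
        exact ih p st
      · rw [if_pos (by simp [hc]), if_pos (by simp [hc])]
        have := ih p (PySem.Set.add st.1 n, st.2.1 ++ [n], n)
        simp only [bfsInnerA, bfsInnerB] at this
        simpa [List.map_append, List.append_assoc] using this

-- running B through one whole level 'cur' (depth d), with A's pending next level as the
-- rest of the queue, equals A's level step followed by B on the produced next level
lemma level_rel (tree : List (Int × List Int)) :
    ∀ (cur : List Int) (h : cur ≠ []) (st : PySem.Set Int × List Int × Int) (n0 d0 d : Int),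
      bfsAltLoop tree (cur.map (fun x => (x, d)) ++ st.2.1.map (fun x => (x, d + 1))) st.1 n0 d0 =
        bfsAltLoop tree ((bfsLevel tree cur st).2.1.map (fun x => (x, d + 1)))
          (bfsLevel tree cur st).1 (cur.getLast h) d := by
  intro cur
  induction cur with
  | nil => intro h; exact absurd rfl h
  | cons c cr ih =>
      intro h st n0 d0 d
      rw [List.map_cons, List.cons_append, bfsAltLoop]
      have hr := inner_rel (d + 1) (pvAdj tree c) (cr.map (fun x => (x, d))) st
      rw [hr]
      by_cases hcr : cr = []
      · subst hcr
        simp only [List.map_nil, List.nil_append]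
        rw [show bfsLevel tree [c] st = bfsInnerA (pvAdj tree c) st from rfl]
        rw [List.getLast_singleton]
      · rw [ih hcr (bfsInnerA (pvAdj tree c) st) c d d]
        rw [show bfsLevel tree (c :: cr) st = bfsLevel tree cr (bfsInnerA (pvAdj tree c) st) from rfl]
        rw [List.getLast_cons hcr]

-- the main simulation: A's level loop equals B's pop loop on the level tagged with depth = step
lemma main_rel (tree : List (Int × List Int)) :
    ∀ (queue : List Int) (v : PySem.Set Int) (step nodeA lastA : Int),
      ∀ (n0 d0 : Int), (queue = [] → step = d0 + 1 ∧ nodeA = n0) →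
        bfsLoop tree queue v step nodeA lastA =
          bfsAltLoop tree (queue.map (fun x => (x, step))) v n0 d0 := by
  intro queue v step nodeA lastA
  fun_induction bfsLoop tree queue v step nodeA lastA with
  | case1 v step nodeA lastA =>
      intro n0 d0 hyp
      obtain ⟨h1, h2⟩ := hyp rfl
      simp [bfsAltLoop, h1, h2]
  | case2 queue v step nodeA lastA h r ih =>
      intro n0 d0 _
      have hl := level_rel tree queue h (v, ([], lastA)) n0 d0 step
      simp only [List.map_nil, List.append_nil] at hl
      rw [hl]
      exact ih (queue.getLast h) step (fun _ => ⟨rfl, rfl⟩)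

-- ===== VERDICT (by name: the statement is the Claim_ definition above) =====
theorem bfs_spec : Claim_equal_bfs := by
  intro tree ini _ _
  unfold Spec_bfs bfs bfs_alt
  rw [main_rel tree [ini] (PySem.Set.add PySem.Set.empty ini) 0 0 0 ini 0 (by intro h; cases h)]
  simp
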